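-- pv_equiv track=rewrite | github.com/oimawin/ics32_assignment4 | parse.py | parse_e_input
-- ===== SOURCE A (Python) =====
-- def parse_e_input(argument: str) -> tuple:
--     argument_list = []
--     argument = argument[2:]
--     for i in range(len(argument)):
--         if argument[i] == '-':
--             edited_argument = argument[i:]
--             next_index = edited_argument.find(' ')
--             if next_index == -1:
--                 option = edited_argument
--                 argument_list.append({'option': option})
--                 continue
--             option = edited_argument[:next_index]
--             edited_argument = edited_argument[next_index:]
--             last_index = edited_argument.find(' -')
--             if last_index == -1:
--                 opt_input = edited_argument[1:]
--             else:
--                 opt_input = edited_argument[1:last_index]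
--             argument_list.append({'option': option, 'opt_input': opt_input})
--
--     return tuple(argument_list)
-- ===== SOURCE B (Python) =====
-- def parse_e_input(argument: str) -> tuple:
--     # Single right-to-left scan: track the nearest space and nearest " -" to the
--     # right of the current position instead of re-scanning each suffix with find().
--     s = argument[2:]
--     n = len(s)
--     out = []
--     next_space = None   # smallest j >= current i with s[j] == ' '
--     next_sd = None      # smallest k >= current i with s[k] == ' ' and s[k+1] == '-'
--     for i in range(n - 1, -1, -1):
--         c = s[i]
--         if c == ' ':
--             next_space = i
--             if i + 1 < n and s[i + 1] == '-':
--                 next_sd = i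
--         elif c == '-':
--             if next_space is None:
--                 out.append({'option': s[i:]})
--             else:
--                 j = next_space
--                 end = next_sd if next_sd is not None else n
--                 out.append({'option': s[i:j], 'opt_input': s[j + 1:end]})
--     out.reverse()
--     return tuple(out)
-- ===== Notes on version B (the rewrite author's own statement) =====
-- stated objective: alternative
-- what changed: Replaces A's per-dash suffix slicing with repeated str.find scans by a single right-to-left pass that tracks the nearest space and the nearest ' -' occurrence to the right of the current position.
import Mathlib
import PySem

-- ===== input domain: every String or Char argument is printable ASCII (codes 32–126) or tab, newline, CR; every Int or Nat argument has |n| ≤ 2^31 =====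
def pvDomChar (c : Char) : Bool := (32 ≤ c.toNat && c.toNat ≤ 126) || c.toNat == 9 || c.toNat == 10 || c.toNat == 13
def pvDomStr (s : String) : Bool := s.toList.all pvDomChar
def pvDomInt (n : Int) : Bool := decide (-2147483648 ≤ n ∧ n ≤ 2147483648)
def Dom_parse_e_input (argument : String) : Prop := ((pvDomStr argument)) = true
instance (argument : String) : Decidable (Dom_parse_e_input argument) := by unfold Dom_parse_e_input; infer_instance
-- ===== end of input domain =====

-- B replaces A's per-dash suffix find() scans by one right-to-left pass that tracks
-- the nearest space and nearest " -" to the right; objective: alternative (different algorithm).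

-- ===== PORT A =====

-- hand port of str.find(' '): index of first ' ', none = -1; exact on lists of chars
def pvFindSpace : List Char → Option Nat
  | [] => none
  | c :: t => if c = ' ' then some 0 else (pvFindSpace t).map (· + 1)

-- hand port of str.find(' -'): first index where ' ' is immediately followed by '-';
-- exact: a two-char pattern matches at a position iff both chars are present there
def pvFindSpaceDash : List Char → Option Nat
  | [] => none
  | c :: t => if c = ' ' ∧ t.headD ' ' = '-' then some 0 else (pvFindSpaceDash t).map (· + 1)

def parse_e_input (argument : String) : List (List (String × String)) :=
  let s := argument.toList.drop 2      -- argument[2:] (drop clamps exactly as the Python slice)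
  (List.range s.length).foldl (fun acc i =>
    if s.getD i ' ' = '-' then         -- argument[i] == '-'; exact: i < len(s)
      let ed := s.drop i               -- argument[i:]
      match pvFindSpace ed with        -- .find(' '); none ↔ -1
      | none => acc ++ [[("option", String.ofList ed)]]
      | some j =>
        let opt := ed.take j           -- edited_argument[:next_index]
        let ed2 := ed.drop j           -- edited_argument[next_index:]
        match pvFindSpaceDash ed2 with -- .find(' -'); none ↔ -1
        | none => acc ++ [[("option", String.ofList opt), ("opt_input", String.ofList (ed2.drop 1))]]
        | some k => acc ++ [[("option", String.ofList opt),
                             ("opt_input", String.ofList ((ed2.drop 1).take (k - 1)))]]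
            -- edited_argument[1:last_index] = drop 1 then take (k-1); exact (k ≥ 0)
    else acc) []

-- ===== PORT B =====

def parse_e_input_alt (argument : String) : List (List (String × String)) :=
  let s := argument.toList.drop 2      -- argument[2:]
  -- range(n-1, -1, -1): the indices of s in descending order
  (((List.range s.length).reverse).foldl
    (fun (st : Option Nat × Option Nat × List (List (String × String))) i =>
      match st with
      | (ns, nsd, out) =>
        let c := s.getD i ' '          -- s[i]; exact: i < len(s)
        if c = ' ' then
          (some i,
           if i + 1 < s.length ∧ s.getD (i + 1) ' ' = '-' then some i else nsd,
           out)
        else if c = '-' then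
          match ns with
          | none => (ns, nsd, out ++ [[("option", String.ofList (s.drop i))]])
          | some j =>
            (ns, nsd, out ++ [[("option", String.ofList ((s.take j).drop i)),       -- s[i:j]
                               ("opt_input", String.ofList ((s.take (nsd.getD s.length)).drop (j + 1)))]])  -- s[j+1:end]
        else st)
    (none, none, [])).2.2.reverse

-- ===== PRECONDITION & SPEC =====
def Spec_parse_e_input (argument : String) (out : List (List (String × String))) : Prop := out = parse_e_input_alt argument
instance (argument : String) (out : List (List (String × String))) : Decidable (Spec_parse_e_input argument out) := by unfold Spec_parse_e_input; infer_instance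

-- ===== CLAIM (what is proved, stated in full; the proofs are below) =====
def Claim_equal_parse_e_input : Prop := ∀ (argument : String), Dom_parse_e_input argument → Spec_parse_e_input argument (parse_e_input argument)

-- ===== LEMMAS AND PROOFS =====

-- first space at index ≥ i, absolute position
def fsp (s : List Char) (i : Nat) : Option Nat := (pvFindSpace (s.drop i)).map (· + i)
-- first " -" occurrence at index ≥ i, absolute position
def fsd (s : List Char) (i : Nat) : Option Nat := (pvFindSpaceDash (s.drop i)).map (· + i)

-- the entry B emits for a dash at index i, phrased with fsp/fsd
def EB (s : List Char) (i : Nat) : List (String × String) :=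
  match fsp s i with
  | none => [("option", String.ofList (s.drop i))]
  | some j => [("option", String.ofList ((s.take j).drop i)),
               ("opt_input", String.ofList ((s.take ((fsd s i).getD s.length)).drop (j + 1)))]

-- the entry A emits for a dash at index i
def EA (s : List Char) (i : Nat) : List (String × String) :=
  match pvFindSpace (s.drop i) with
  | none => [("option", String.ofList (s.drop i))]
  | some j =>
    match pvFindSpaceDash (List.drop j (List.drop i s)) with
    | none => [("option", String.ofList (List.take j (List.drop i s))),
               ("opt_input", String.ofList (List.drop 1 (List.drop j (List.drop i s))))]
    | some k => [("option", String.ofList (List.take j (List.drop i s))),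
                 ("opt_input", String.ofList (List.take (k - 1) (List.drop 1 (List.drop j (List.drop i s)))))]

def stepB (s : List Char) : (Option Nat × Option Nat × List (List (String × String))) → Nat →
    (Option Nat × Option Nat × List (List (String × String))) :=
  fun st i =>
    match st with
    | (ns, nsd, out) =>
      let c := s.getD i ' '
      if c = ' ' then
        (some i,
         if i + 1 < s.length ∧ s.getD (i + 1) ' ' = '-' then some i else nsd,
         out)
      else if c = '-' then
        match ns with
        | none => (ns, nsd, out ++ [[("option", String.ofList (s.drop i))]])
        | some j =>
          (ns, nsd, out ++ [[("option", String.ofList ((s.take j).drop i)),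
                             ("opt_input", String.ofList ((s.take (nsd.getD s.length)).drop (j + 1)))]])
      else st

lemma drop_cons (s : List Char) (i : Nat) (h : i < s.length) :
    s.drop i = s.getD i ' ' :: s.drop (i + 1) := by
  rw [List.getD_eq_getElem s ' ' h, List.drop_eq_getElem_cons h]

lemma fsp_none (s : List Char) (i : Nat) (h : s.length ≤ i) : fsp s i = none := by
  simp [fsp, List.drop_eq_nil_of_le h, pvFindSpace]

lemma fsd_none (s : List Char) (i : Nat) (h : s.length ≤ i) : fsd s i = none := by
  simp [fsd, List.drop_eq_nil_of_le h, pvFindSpaceDash]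

lemma fsp_step (s : List Char) (i : Nat) (h : i < s.length) :
    fsp s i = if s.getD i ' ' = ' ' then some i else fsp s (i + 1) := by
  rw [fsp, drop_cons s i h, pvFindSpace]
  split
  · simp
  · cases hx : pvFindSpace (List.drop (i + 1) s) <;> simp [fsp, hx] <;> omega

lemma fsd_step (s : List Char) (i : Nat) (h : i < s.length) :
    fsd s i = if s.getD i ' ' = ' ' ∧ i + 1 < s.length ∧ s.getD (i + 1) ' ' = '-'
              then some i else fsd s (i + 1) := by
  rw [fsd, drop_cons s i h, pvFindSpaceDash]
  have hhead : (s.drop (i + 1)).headD ' ' = '-' ↔ (i + 1 < s.length ∧ s.getD (i + 1) ' ' = '-') := by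
    by_cases h1 : i + 1 < s.length
    · rw [drop_cons s (i + 1) h1]; simp [h1]
    · rw [List.drop_eq_nil_of_le (by omega)]
      simp only [List.headD_nil]
      constructor
      · intro hc; exact absurd hc (by decide)
      · rintro ⟨hlt, _⟩; omega
  by_cases hc : s.getD i ' ' = ' ' ∧ (s.drop (i + 1)).headD ' ' = '-'
  · rw [if_pos hc, if_pos ⟨hc.1, hhead.mp hc.2⟩]; simp
  · rw [if_neg hc, if_neg (by rw [← hhead] at *; tauto)]
    cases hx : pvFindSpaceDash (List.drop (i + 1) s) <;> simp [fsd, hx] <;> omega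

-- no space strictly before the first " -" to the right: walking forward over
-- non-space characters does not change fsd, so fsd at i equals fsd at the first space
lemma fsd_chain (s : List Char) : ∀ d i j, s.length ≤ i + d → fsp s i = some j → fsd s i = fsd s j := by
  intro d
  induction d with
  | zero => intro i j hle hf; rw [fsp_none s i (by omega)] at hf; cases hf
  | succ d ih =>
    intro i j hle hf
    by_cases h : i < s.length
    · rw [fsp_step s i h] at hf
      by_cases hsp : s.getD i ' ' = ' '
      · rw [if_pos hsp] at hf; cases hf; rfl
      · rw [if_neg hsp] at hf
        rw [fsd_step s i h, if_neg (by tauto)]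
        exact ih (i + 1) j (by omega) hf
    · rw [fsp_none s i (by omega)] at hf; cases hf

lemma fsp_ge (s : List Char) : ∀ d i j, s.length ≤ i + d → fsp s i = some j → i ≤ j := by
  intro d
  induction d with
  | zero => intro i j hle hf; rw [fsp_none s i (by omega)] at hf; cases hf
  | succ d ih =>
    intro i j hle hf
    by_cases h : i < s.length
    · rw [fsp_step s i h] at hf
      by_cases hsp : s.getD i ' ' = ' '
      · rw [if_pos hsp] at hf; cases hf; omega
      · rw [if_neg hsp] at hf; have := ih (i + 1) j (by omega) hf; omega
    · rw [fsp_none s i (by omega)] at hf; cases hf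

-- A's entry and B's entry coincide at every dash position
lemma EA_eq_EB (s : List Char) (i : Nat) : EA s i = EB s i := by
  unfold EA EB
  cases hf : fsp s i with
  | none =>
    have hp : pvFindSpace (s.drop i) = none := by
      cases hp : pvFindSpace (s.drop i) with
      | none => rfl
      | some j0 => rw [fsp, hp] at hf; cases hf
    simp [hp]
  | some j =>
    have hij : i ≤ j := fsp_ge s s.length i j (by omega) hf
    have hj : pvFindSpace (s.drop i) = some (j - i) := by
      cases hp : pvFindSpace (s.drop i) with
      | none => rw [fsp, hp] at hf; cases hf
      | some j0 => rw [fsp, hp] at hf; simp at hf; rw [← hf]; simp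
    have hdd : List.drop (j - i) (List.drop i s) = s.drop j := by
      rw [List.drop_drop]; congr 1; omega
    have hchain : fsd s i = fsd s j := fsd_chain s s.length i j (by omega) hf
    cases hd : pvFindSpaceDash (s.drop j) with
    | none =>
      have hni : fsd s i = none := by
        rw [hchain]; show (pvFindSpaceDash (s.drop j)).map _ = none; rw [hd]; rfl
      simp only [hj, hdd, hd, hni, Option.getD_none]
      rw [List.take_length]
      simp only [List.drop_take, List.drop_drop]
    | some k0 =>
      have hk : fsd s i = some (k0 + j) := by
        rw [hchain]; show (pvFindSpaceDash (s.drop j)).map _ = _; rw [hd]; rfl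
      simp only [hj, hdd, hd, hk, Option.getD_some]
      simp only [List.drop_take, List.drop_drop]
      have h1 : k0 + j - (j + 1) = k0 - 1 := by omega
      rw [h1]

lemma foldA (s : List Char) (l : List Nat) (acc : List (List (String × String))) :
    l.foldl (fun acc i =>
      if s.getD i ' ' = '-' then
        let ed := s.drop i
        match pvFindSpace ed with
        | none => acc ++ [[("option", String.ofList ed)]]
        | some j =>
          let opt := ed.take j
          let ed2 := ed.drop j
          match pvFindSpaceDash ed2 with
          | none => acc ++ [[("option", String.ofList opt), ("opt_input", String.ofList (ed2.drop 1))]]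
          | some k => acc ++ [[("option", String.ofList opt),
                               ("opt_input", String.ofList ((ed2.drop 1).take (k - 1)))]]
      else acc) acc
    = acc ++ (l.filter (fun i => decide (s.getD i ' ' = '-'))).map (EA s) := by
  have hfun : (fun (acc : List (List (String × String))) i =>
      if s.getD i ' ' = '-' then
        let ed := s.drop i
        match pvFindSpace ed with
        | none => acc ++ [[("option", String.ofList ed)]]
        | some j =>
          let opt := ed.take j
          let ed2 := ed.drop j
          match pvFindSpaceDash ed2 with
          | none => acc ++ [[("option", String.ofList opt), ("opt_input", String.ofList (ed2.drop 1))]]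
          | some k => acc ++ [[("option", String.ofList opt),
                               ("opt_input", String.ofList ((ed2.drop 1).take (k - 1)))]]
      else acc)
      = (fun acc i => if s.getD i ' ' = '-' then acc ++ [EA s i] else acc) := by
    funext acc i
    by_cases hc : s.getD i ' ' = '-'
    · rw [if_pos hc, if_pos hc]
      simp only [EA]
      rcases hp : pvFindSpace (s.drop i) with _ | j
      · simp only [hp]
      · simp only [hp]
        rcases hd : pvFindSpaceDash (List.drop j (List.drop i s)) with _ | k
        · simp only [hd]
        · simp only [hd]
    · rw [if_neg hc, if_neg hc]
  rw [hfun]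
  induction l generalizing acc with
  | nil => simp
  | cons x t ih =>
    rw [List.foldl_cons, List.filter_cons]
    by_cases hc : s.getD x ' ' = '-'
    · rw [if_pos hc, if_pos (show decide (s.getD x ' ' = '-') = true by rw [hc]; decide),
          List.map_cons, ih (acc ++ [EA s x]), List.append_assoc, List.singleton_append]
    · rw [if_neg hc, if_neg (show ¬(decide (s.getD x ' ' = '-') = true) by simpa using hc)]
      exact ih acc

lemma parse_A (argument : String) :
    parse_e_input argument =
      (((List.range (argument.toList.drop 2).length).filter
          (fun i => decide ((argument.toList.drop 2).getD i ' ' = '-'))).map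
        (EA (argument.toList.drop 2))) := by
  unfold parse_e_input
  exact (foldA (argument.toList.drop 2) (List.range (argument.toList.drop 2).length) []).trans
    (List.nil_append _)

-- B's fold invariant: after the descending pass over indices n-1 … i, the state is
-- (first space ≥ i, first " -" ≥ i, entries for dashes at indices ≥ i, rightmost first)
lemma parse_B_inv (s : List Char) :
    ∀ d i, i + d = s.length →
      ((List.range' i d).reverse).foldl (stepB s) (none, none, []) =
        (fsp s i, fsd s i,
         (((List.range' i d).filter (fun m => decide (s.getD m ' ' = '-'))).map (EB s)).reverse) := by
  intro d
  induction d with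
  | zero =>
    intro i hi
    simp [fsp_none s i (by omega), fsd_none s i (by omega)]
  | succ d ih =>
    intro i hi
    have hlt : i < s.length := by omega
    rw [List.range'_succ]
    simp only [List.reverse_cons, List.foldl_append, List.foldl_cons, List.foldl_nil]
    rw [ih (i + 1) (by omega)]
    show stepB s (fsp s (i + 1), fsd s (i + 1), _) i = _
    rw [List.filter_cons]
    unfold stepB
    simp only
    by_cases hsp : s.getD i ' ' = ' '
    · rw [if_pos hsp, if_neg (show ¬(decide (s.getD i ' ' = '-') = true) by rw [hsp]; decide),
          fsp_step s i hlt, if_pos hsp, fsd_step s i hlt]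
      simp only [Prod.mk.injEq]
      refine ⟨trivial, ?_, trivial⟩
      by_cases hc2 : i + 1 < s.length ∧ s.getD (i + 1) ' ' = '-'
      · rw [if_pos hc2, if_pos ⟨hsp, hc2⟩]
      · rw [if_neg hc2, if_neg (fun h => hc2 h.2)]
    · have hfsp : fsp s i = fsp s (i + 1) := by rw [fsp_step s i hlt, if_neg hsp]
      have hfsd : fsd s i = fsd s (i + 1) := by
        rw [fsd_step s i hlt, if_neg (by tauto)]
      rw [if_neg hsp, hfsp, hfsd]
      by_cases hda : s.getD i ' ' = '-'
      · rw [if_pos hda, if_pos (by rw [hda]; decide), List.map_cons, List.reverse_cons]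
        cases hns : fsp s (i + 1) with
        | none =>
          have hEB : EB s i = [("option", String.ofList (s.drop i))] := by
            unfold EB; rw [hfsp, hns]
          rw [hEB]
        | some j =>
          have hEB : EB s i = [("option", String.ofList ((s.take j).drop i)),
              ("opt_input", String.ofList ((s.take ((fsd s (i + 1)).getD s.length)).drop (j + 1)))] := by
            unfold EB; rw [hfsp, hns, hfsd]
          rw [hEB]
      · rw [if_neg hda, if_neg (by simpa using hda)]

lemma parse_B (argument : String) :
    parse_e_input_alt argument =
      (((List.range (argument.toList.drop 2).length).filter
          (fun i => decide ((argument.toList.drop 2).getD i ' ' = '-'))).map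
        (EB (argument.toList.drop 2))) := by
  unfold parse_e_input_alt
  show ((((List.range (argument.toList.drop 2).length).reverse).foldl
      (stepB (argument.toList.drop 2)) (none, none, [])).2.2).reverse = _
  rw [List.range_eq_range', parse_B_inv (argument.toList.drop 2) (argument.toList.drop 2).length 0 (by omega)]
  simp

-- ===== VERDICT (by name: the statement is the Claim_ definition above) =====
theorem parse_e_input_spec : Claim_equal_parse_e_input := by
  intro argument _
  unfold Spec_parse_e_input
  rw [parse_A, parse_B]
  exact List.map_congr_left (fun i _ => EA_eq_EB _ i)
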